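-- pv_equiv track=rewrite | github.com/henrik-olvr/TE-CPD | sort.py | SheS
-- ===== SOURCE A (Python) =====
-- def SheS(lista):
--     trocas = comparacoes = 0
--     sublistcount = len(lista)//2
--     while sublistcount > 0:
--       comparacoes = comparacoes + 1
--       for startposition in range(sublistcount):
--         gap = gapInsertionSort(lista,startposition,sublistcount)
--         trocas = trocas + gap['trocas']
--         comparacoes = comparacoes + gap['comparacoes']
--
--       sublistcount = sublistcount // 2
--
--     return {'trocas': trocas, 'comparacoes': comparacoes}
--
-- def gapInsertionSort(lista,start,gap):
--     trocas = comparacoes = 0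
--     for i in range(start+gap,len(lista),gap):
--
--         currentvalue = lista[i]
--         position = i
--
--         while position>=gap and lista[position-gap]>currentvalue:
--             comparacoes = comparacoes + 1
--             trocas = trocas + 1
--
--             lista[position]=lista[position-gap]
--             position = position-gap
--
--         trocas = trocas + 1
--         lista[position]=currentvalue
--
--     return {'trocas': trocas, 'comparacoes': comparacoes}
-- ===== SOURCE B (Python) =====
-- def SheS(lista):
--     # Same return value as A; also leaves lista fully sorted like A does.
--     n = len(lista)
--     trocas = 0
--     comparacoes = 0
--     gap = n // 2
--     while gap > 0:
--         comparacoes += 1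
--         for start in range(gap):
--             idxs = range(start, n, gap)
--             sub = [lista[j] for j in idxs]
--             inv = 0
--             for j in range(len(sub)):
--                 for i in range(j):
--                     if sub[i] > sub[j]:
--                         inv += 1
--             trocas += inv + len(sub) - 1
--             comparacoes += inv
--             for j, v in zip(idxs, sorted(sub)):
--                 lista[j] = v
--         gap //= 2
--     return {'trocas': trocas, 'comparacoes': comparacoes}
-- ===== Notes on version B (the rewrite author's own statement) =====
-- stated objective: alternative
-- what changed: A shell-sorts in place, its counters emerging from the element-shifting inner while loop; B instead extracts each gap subsequence, counts its inversions by a direct pair count, derives both counters arithmetically (comparacoes += inversions, trocas += inversions + len-1) and writes back the library-sorted subsequence — trading speed on large inputs for a direct, shift-free formulation of the counts.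
import Mathlib
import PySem

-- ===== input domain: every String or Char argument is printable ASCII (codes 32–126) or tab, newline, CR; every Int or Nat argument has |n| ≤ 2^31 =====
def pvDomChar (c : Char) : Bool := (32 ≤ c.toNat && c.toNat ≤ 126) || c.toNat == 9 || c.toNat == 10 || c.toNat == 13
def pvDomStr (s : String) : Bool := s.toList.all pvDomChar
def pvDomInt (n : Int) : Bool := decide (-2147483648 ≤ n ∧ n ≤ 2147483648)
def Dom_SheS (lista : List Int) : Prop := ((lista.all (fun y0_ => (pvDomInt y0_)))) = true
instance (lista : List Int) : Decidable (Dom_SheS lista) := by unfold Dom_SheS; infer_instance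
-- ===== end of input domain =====

-- B replaces A's in-place gap insertion sort by a per-subsequence pair-inversion count plus a
-- library sort (counts derived arithmetically); equivalence is about the RETURN value (both
-- Pythons also mutate `lista` into the same fully sorted list).

-- ===== PORT A =====
-- inner `while position>=gap and lista[position-gap]>currentvalue` of gapInsertionSort;
-- the `1 ≤ gap` conjunct only makes the recursion total (every call site has gap ≥ 1, as in A)
def gapShift (l : List Int) (pos gap : Nat) (cv t c : Int) : List Int × Nat × Int × Int :=
  if _h : 1 ≤ gap ∧ gap ≤ pos ∧ l.getD (pos - gap) 0 > cv then
    gapShift (l.set pos (l.getD (pos - gap) 0)) (pos - gap) gap cv (t + 1) (c + 1)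
  else (l, pos, t, c)
termination_by pos
decreasing_by omega

-- `for i in range(start+gap, len(lista), gap)` (Python evaluates len(lista) once; n is that value)
def gapForLoop (l : List Int) (n i gap : Nat) (t c : Int) : List Int × Int × Int :=
  if _h : i < n ∧ 1 ≤ gap then
    match gapShift l i gap (l.getD i 0) t c with
    | (l', pos, t', c') => gapForLoop (l'.set pos (l.getD i 0)) n (i + gap) gap (t' + 1) c'
  else (l, t, c)
termination_by n - i
decreasing_by omega

def gapInsertionSort (l : List Int) (start gap : Nat) : List Int × Int × Int :=
  gapForLoop l l.length (start + gap) gap 0 0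

-- `for startposition in range(sublistcount)` (indices are the Nats 0..sc-1)
def shesStartLoop (sc : Nat) (st : List Int × Int × Int) : List Int × Int × Int :=
  (List.range sc).foldl (fun st start =>
    match gapInsertionSort st.1 start sc with
    | (l', gt, gc) => (l', st.2.1 + gt, st.2.2 + gc)) st

def shesGapLoop (l : List Int) (sc : Nat) (t c : Int) : Int × Int :=
  if _h : 0 < sc then
    match shesStartLoop sc (l, t, c + 1) with
    | (l', t', c') => shesGapLoop l' (sc / 2) t' c'
  else (t, c)
termination_by sc
decreasing_by exact Nat.div_lt_self _h (by omega)

def SheS (lista : List Int) : List (String × Int) :=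
  match shesGapLoop lista (lista.length / 2) 0 0 with
  | (t, c) => [("trocas", t), ("comparacoes", c)]

-- ===== PORT B =====
-- length of range(start, n, gap) for gap ≥ 1
def subLen (n start gap : Nat) : Nat := (n - start + gap - 1) / gap

-- `[lista[j] for j in range(start, n, gap)]`
def extractSub (l : List Int) (start gap : Nat) : List Int :=
  (List.range (subLen l.length start gap)).map (fun j => l.getD (start + j * gap) 0)

-- the two nested `for` loops counting pairs i < j with sub[i] > sub[j]
def invCount (sub : List Int) : Int :=
  (List.range sub.length).foldl (fun acc j =>
    (List.range j).foldl (fun acc2 i => if sub.getD i 0 > sub.getD j 0 then acc2 + 1 else acc2) acc) 0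

-- `for j, v in zip(idxs, sorted(sub)): lista[j] = v`
def scatter (l : List Int) (start gap : Nat) (vals : List Int) : List Int :=
  (vals.zipIdx).foldl (fun l' p => l'.set (start + p.2 * gap) p.1) l

def altStartLoop (gap : Nat) (st : List Int × Int × Int) : List Int × Int × Int :=
  (List.range gap).foldl (fun st start =>
    let sub := extractSub st.1 start gap
    let inv := invCount sub
    (scatter st.1 start gap (PySem.List.sorted sub (fun x => x)),
     st.2.1 + inv + (sub.length : Int) - 1, st.2.2 + inv)) st

def altGapLoop (l : List Int) (gap : Nat) (t c : Int) : Int × Int :=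
  if _h : 0 < gap then
    match altStartLoop gap (l, t, c + 1) with
    | (l', t', c') => altGapLoop l' (gap / 2) t' c'
  else (t, c)
termination_by gap
decreasing_by exact Nat.div_lt_self _h (by omega)

def SheS_alt (lista : List Int) : List (String × Int) :=
  match altGapLoop lista (lista.length / 2) 0 0 with
  | (t, c) => [("trocas", t), ("comparacoes", c)]

-- ===== PRECONDITION & SPEC =====
def Spec_SheS (lista : List Int) (out : List (String × Int)) : Prop := out = SheS_alt lista
instance (lista : List Int) (out : List (String × Int)) : Decidable (Spec_SheS lista out) := by unfold Spec_SheS; infer_instance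

-- ===== CLAIM (what is proved, stated in full; the proofs are below) =====
def Claim_equal_SheS : Prop := ∀ (lista : List Int), Dom_SheS lista → Spec_SheS lista (SheS lista)

-- ===== LEMMAS AND PROOFS =====

-- conditional one-step unfoldings of the loops
theorem gapShift_pos (l : List Int) (pos gap : Nat) (cv t c : Int)
    (h : 1 ≤ gap ∧ gap ≤ pos ∧ l.getD (pos - gap) 0 > cv) :
    gapShift l pos gap cv t c
      = gapShift (l.set pos (l.getD (pos - gap) 0)) (pos - gap) gap cv (t + 1) (c + 1) := by
  rw [gapShift, dif_pos h]

theorem gapShift_neg (l : List Int) (pos gap : Nat) (cv t c : Int)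
    (h : ¬ (1 ≤ gap ∧ gap ≤ pos ∧ l.getD (pos - gap) 0 > cv)) :
    gapShift l pos gap cv t c = (l, pos, t, c) := by
  rw [gapShift, dif_neg h]

-- small getD/set facts
theorem pvGetD_set_ne (l : List Int) (p q : Nat) (v : Int) (h : q ≠ p) :
    (l.set p v).getD q 0 = l.getD q 0 := by
  simp [List.getD_eq_getElem?_getD, (Ne.symm h : p ≠ q)]

theorem pvGetD_set_self (l : List Int) (p : Nat) (v : Int) (h : p < l.length) :
    (l.set p v).getD p 0 = v := by
  simp [List.getD_eq_getElem?_getD, h]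

theorem pvGetD_mid (s d : List Int) (y : Int) : (s ++ y :: d).getD s.length 0 = y := by
  simp [List.getD_eq_getElem?_getD]

theorem pvSet_mid (s d : List Int) (y v : Int) : (s ++ y :: d).set s.length v = s ++ v :: d := by
  simp

theorem pvGetD_eq_getElem (l : List Int) (i : Nat) (h : i < l.length) : l.getD i 0 = l[i] := by
  simp [List.getD_eq_getElem?_getD, List.getElem?_eq_getElem h]

-- recursive normal form of B's scatter
def scatterR (l : List Int) (p gap : Nat) : List Int → List Int
  | [] => l
  | v :: vs => scatterR (l.set p v) (p + gap) gap vs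

theorem scatter_aux (start gap : Nat) (vals : List Int) : ∀ (l : List Int) (k : Nat),
    (vals.zipIdx k).foldl (fun l' p => l'.set (start + p.2 * gap) p.1) l
      = scatterR l (start + k * gap) gap vals := by
  induction vals with
  | nil => intro l k; simp [scatterR]
  | cons v vs ih =>
    intro l k
    rw [List.zipIdx_cons]
    simp only [List.foldl_cons]
    rw [ih]
    have h : start + (k + 1) * gap = (start + k * gap) + gap := by ring
    rw [h, scatterR]

theorem scatter_eq_scatterR (l : List Int) (start gap : Nat) (vals : List Int) :
    scatter l start gap vals = scatterR l start gap vals := by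
  have := scatter_aux start gap vals l 0
  simpa [scatter] using this

theorem scatterR_length (vals : List Int) (gap : Nat) : ∀ (l : List Int) (p : Nat),
    (scatterR l p gap vals).length = l.length := by
  induction vals with
  | nil => intro l p; rfl
  | cons v vs ih => intro l p; simp only [scatterR]; rw [ih]; simp

theorem scatterR_getD_lt (vals : List Int) (gap q : Nat) : ∀ (l : List Int) (p : Nat), q < p →
    (scatterR l p gap vals).getD q 0 = l.getD q 0 := by
  induction vals with
  | nil => intro l p _; rfl
  | cons v vs ih =>
    intro l p h
    simp only [scatterR]
    rw [ih _ _ (by omega)]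
    exact pvGetD_set_ne l p q v (by omega)

theorem scatterR_set_lt (vals : List Int) (gap q : Nat) (v : Int) : ∀ (l : List Int) (p : Nat), q < p →
    (scatterR l p gap vals).set q v = scatterR (l.set q v) p gap vals := by
  induction vals with
  | nil => intro l p _; rfl
  | cons w vs ih =>
    intro l p h
    simp only [scatterR]
    rw [ih _ _ (by omega), List.set_comm _ _ (by omega : p ≠ q)]

theorem scatterR_getD_stride (vals : List Int) (gap : Nat) (hg : 1 ≤ gap) :
    ∀ (l : List Int) (p j : Nat), j < vals.length → p + j * gap < l.length →
    (scatterR l p gap vals).getD (p + j * gap) 0 = vals.getD j 0 := by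
  induction vals with
  | nil => intro l p j hj _; simp at hj
  | cons v vs ih =>
    intro l p j hj hb
    cases j with
    | zero =>
      simp only [scatterR]
      rw [scatterR_getD_lt vs gap _ _ _ (by omega)]
      simp only [Nat.zero_mul, Nat.add_zero] at hb ⊢
      rw [pvGetD_set_self l p v hb]
      rfl
    | succ j =>
      simp only [scatterR]
      have h : p + (j + 1) * gap = (p + gap) + j * gap := by ring
      rw [h]
      rw [ih (l.set p v) (p + gap) j (by simpa using hj) (by simpa [← h] using hb)]
      rfl

theorem scatterR_set_stride (vals : List Int) (gap : Nat) (hg : 1 ≤ gap) (v : Int) :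
    ∀ (l : List Int) (p j : Nat), j < vals.length →
    (scatterR l p gap vals).set (p + j * gap) v = scatterR l p gap (vals.set j v) := by
  induction vals with
  | nil => intro l p j hj; simp at hj
  | cons w vs ih =>
    intro l p j hj
    cases j with
    | zero =>
      simp only [scatterR, Nat.zero_mul, Nat.add_zero, List.set_cons_zero]
      rw [scatterR_set_lt vs gap _ _ _ _ (by omega), List.set_set]
    | succ j =>
      simp only [scatterR, List.set_cons_succ]
      have h : p + (j + 1) * gap = (p + gap) + j * gap := by ring
      rw [h, ih (l.set p w) (p + gap) j (by simpa using hj)]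

theorem scatterR_extract_self (gap : Nat) : ∀ (m : Nat) (l : List Int) (p : Nat),
    scatterR l p gap ((List.range m).map (fun j => l.getD (p + j * gap) 0)) = l := by
  intro m
  induction m with
  | zero => intro l p; rfl
  | succ m ih =>
    intro l p
    rw [List.range_succ_eq_map]
    simp only [List.map_cons, List.map_map, scatterR, Nat.zero_mul, Nat.add_zero]
    have hset : l.set p (l.getD p 0) = l := by
      rcases Nat.lt_or_ge p l.length with h | h
      · rw [pvGetD_eq_getElem l p h]; exact List.set_getElem_self h
      · exact List.set_eq_of_length_le h
    rw [hset]
    have hfun : ((fun j => l.getD (p + j * gap) 0) ∘ Nat.succ)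
        = (fun j => l.getD ((p + gap) + j * gap) 0) := by
      funext j
      simp only [Function.comp]
      congr 1
      simp only [Nat.succ_eq_add_one]
      ring
    rw [hfun, ih l (p + gap)]

-- stride position bounds
theorem stride_lt (n start gap j : Nat) (hg : 1 ≤ gap) (hj : j < subLen n start gap) :
    start + j * gap < n := by
  unfold subLen at hj
  rcases Nat.lt_or_ge start n with h | h
  · have h1 : (j + 1) * gap ≤ ((n - start + gap - 1) / gap) * gap :=
      Nat.mul_le_mul_right _ (by omega)
    have h2 : ((n - start + gap - 1) / gap) * gap ≤ n - start + gap - 1 :=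
      Nat.div_mul_le_self _ _
    have h3 : (j + 1) * gap = j * gap + gap := by ring
    rw [h3] at h1
    omega
  · exfalso
    have h0 : n - start = 0 := by omega
    rw [h0] at hj
    have : (0 + gap - 1) / gap = 0 := Nat.div_eq_of_lt (by omega)
    omega

theorem stride_ge (n start gap j : Nat) (hg : 1 ≤ gap) (hj : subLen n start gap ≤ j) :
    n ≤ start + j * gap := by
  rcases Nat.lt_or_ge start n with h | h
  · unfold subLen at hj
    have hmod := Nat.div_add_mod (n - start + gap - 1) gap
    have hlt : (n - start + gap - 1) % gap < gap := Nat.mod_lt _ (by omega)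
    have h2 : gap * ((n - start + gap - 1) / gap) ≤ gap * j := Nat.mul_le_mul_left _ hj
    have h3 : gap * j = j * gap := Nat.mul_comm _ _
    omega
  · omega

theorem subLen_pos (n start gap : Nat) (hg : 1 ≤ gap) (h : start < n) :
    1 ≤ subLen n start gap := by
  unfold subLen
  exact (Nat.one_le_div_iff (by omega)).mpr (by omega)

-- abstract model of the inner while loop, acting on the extracted subsequence
def absShift (e : List Int) (j : Nat) (cv t c : Int) : List Int × Nat × Int × Int :=
  if _h : 1 ≤ j ∧ e.getD (j - 1) 0 > cv then
    absShift (e.set j (e.getD (j - 1) 0)) (j - 1) cv (t + 1) (c + 1)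
  else (e, j, t, c)
termination_by j
decreasing_by omega

theorem absShift_pos (e : List Int) (j : Nat) (cv t c : Int)
    (h : 1 ≤ j ∧ e.getD (j - 1) 0 > cv) :
    absShift e j cv t c = absShift (e.set j (e.getD (j - 1) 0)) (j - 1) cv (t + 1) (c + 1) := by
  rw [absShift, dif_pos h]

theorem absShift_neg (e : List Int) (j : Nat) (cv t c : Int)
    (h : ¬ (1 ≤ j ∧ e.getD (j - 1) 0 > cv)) :
    absShift e j cv t c = (e, j, t, c) := by
  rw [absShift, dif_neg h]

theorem absShift_length (j : Nat) : ∀ (e : List Int) (cv t c : Int),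
    (absShift e j cv t c).1.length = e.length := by
  induction j using Nat.strong_induction_on with
  | _ j ih =>
    intro e cv t c
    by_cases h : 1 ≤ j ∧ e.getD (j - 1) 0 > cv
    · rw [absShift_pos _ _ _ _ _ h, ih (j - 1) (by omega)]
      simp
    · rw [absShift_neg _ _ _ _ _ h]

theorem absShift_fst_le (j : Nat) : ∀ (e : List Int) (cv t c : Int),
    (absShift e j cv t c).2.1 ≤ j := by
  induction j using Nat.strong_induction_on with
  | _ j ih =>
    intro e cv t c
    by_cases h : 1 ≤ j ∧ e.getD (j - 1) 0 > cv
    · rw [absShift_pos _ _ _ _ _ h]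
      have := ih (j - 1) (by omega) (e.set j (e.getD (j - 1) 0)) cv (t + 1) (c + 1)
      omega
    · rw [absShift_neg _ _ _ _ _ h]

def absFor (e : List Int) (j : Nat) (t c : Int) : List Int × Int × Int :=
  if _h : j < e.length then
    absFor ((absShift e j (e.getD j 0) t c).1.set (absShift e j (e.getD j 0) t c).2.1 (e.getD j 0))
      (j + 1) ((absShift e j (e.getD j 0) t c).2.2.1 + 1) (absShift e j (e.getD j 0) t c).2.2.2
  else (e, t, c)
termination_by e.length - j
decreasing_by
  simp only [List.length_set, absShift_length]
  omega

theorem absFor_pos (e : List Int) (j : Nat) (t c : Int) (h : j < e.length) :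
    absFor e j t c
      = absFor ((absShift e j (e.getD j 0) t c).1.set (absShift e j (e.getD j 0) t c).2.1 (e.getD j 0))
          (j + 1) ((absShift e j (e.getD j 0) t c).2.2.1 + 1) (absShift e j (e.getD j 0) t c).2.2.2 := by
  rw [absFor, dif_pos h]

theorem absFor_neg (e : List Int) (j : Nat) (t c : Int) (h : ¬ j < e.length) :
    absFor e j t c = (e, t, c) := by
  rw [absFor, dif_neg h]

-- simulation of the concrete strided while loop by the abstract one
theorem sim_shift (l : List Int) (start gap : Nat) (cv : Int) (hg : 1 ≤ gap) (hs : start < gap) :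
    ∀ (j : Nat) (e : List Int) (t c : Int),
      e.length = subLen l.length start gap → j < e.length →
    gapShift (scatterR l start gap e) (start + j * gap) gap cv t c
      = (scatterR l start gap (absShift e j cv t c).1,
         start + (absShift e j cv t c).2.1 * gap,
         (absShift e j cv t c).2.2.1, (absShift e j cv t c).2.2.2) := by
  intro j
  induction j using Nat.strong_induction_on with
  | _ j ih =>
    intro e t c hel hj
    have hLlen : (scatterR l start gap e).length = l.length := scatterR_length e gap l start
    by_cases hcond : 1 ≤ j ∧ e.getD (j - 1) 0 > cv
    · have hjm : j - 1 < e.length := by omega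
      have hpos : start + (j - 1) * gap < l.length :=
        stride_lt _ _ _ _ hg (by omega)
      have hgetd : (scatterR l start gap e).getD (start + (j - 1) * gap) 0 = e.getD (j - 1) 0 :=
        scatterR_getD_stride e gap hg l start (j - 1) hjm hpos
      have hmul : j * gap = (j - 1) * gap + gap := by
        cases j with
        | zero => omega
        | succ m => simp [Nat.succ_mul]
      have hsub : start + j * gap - gap = start + (j - 1) * gap := by omega
      have hcA : 1 ≤ gap ∧ gap ≤ start + j * gap ∧
          (scatterR l start gap e).getD (start + j * gap - gap) 0 > cv := by
        refine ⟨hg, by omega, ?_⟩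
        rw [hsub, hgetd]
        exact hcond.2
      rw [gapShift_pos _ _ _ _ _ _ hcA, absShift_pos _ _ _ _ _ hcond]
      rw [hsub, hgetd]
      rw [scatterR_set_stride e gap hg _ l start j hj]
      exact ih (j - 1) (by omega) (e.set j (e.getD (j - 1) 0)) (t + 1) (c + 1)
        (by simpa using hel) (by simpa using hjm)
    · have hcB : ¬ (1 ≤ gap ∧ gap ≤ start + j * gap ∧
          (scatterR l start gap e).getD (start + j * gap - gap) 0 > cv) := by
        intro hA
        apply hcond
        have hj1 : 1 ≤ j := by
          by_contra hj0
          have hj0' : j = 0 := by omega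
          subst hj0'
          simp only [Nat.zero_mul, Nat.add_zero] at hA
          omega
        refine ⟨hj1, ?_⟩
        have hmul : j * gap = (j - 1) * gap + gap := by
          cases j with
          | zero => omega
          | succ m => simp [Nat.succ_mul]
        have hsub : start + j * gap - gap = start + (j - 1) * gap := by omega
        have hpos : start + (j - 1) * gap < l.length := stride_lt _ _ _ _ hg (by omega)
        have hgetd := scatterR_getD_stride e gap hg l start (j - 1) (by omega) hpos
        rw [hsub, hgetd] at hA
        exact hA.2.2
      rw [gapShift_neg _ _ _ _ _ _ hcB, absShift_neg _ _ _ _ _ hcond]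

theorem sim_for (l : List Int) (start gap : Nat) (hg : 1 ≤ gap) (hs : start < gap) :
    ∀ (m : Nat) (e : List Int) (j : Nat) (t c : Int),
      m = e.length - j → e.length = subLen l.length start gap → 1 ≤ j →
    gapForLoop (scatterR l start gap e) l.length (start + j * gap) gap t c
      = (scatterR l start gap (absFor e j t c).1, (absFor e j t c).2.1, (absFor e j t c).2.2) := by
  intro m
  induction m with
  | zero =>
    intro e j t c hm hel hj
    have hge : l.length ≤ start + j * gap := stride_ge _ _ _ _ hg (by omega)
    rw [gapForLoop, dif_neg (by omega), absFor_neg _ _ _ _ (by omega)]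
  | succ m ih =>
    intro e j t c hm hel hj
    have hj2 : j < e.length := by omega
    have hlt : start + j * gap < l.length := stride_lt _ _ _ _ hg (by omega)
    rw [gapForLoop, dif_pos ⟨hlt, hg⟩]
    have hcv : (scatterR l start gap e).getD (start + j * gap) 0 = e.getD j 0 :=
      scatterR_getD_stride e gap hg l start j hj2 hlt
    rw [hcv]
    rw [sim_shift l start gap (e.getD j 0) hg hs j e t c hel hj2]
    dsimp only
    have hjle := absShift_fst_le j e (e.getD j 0) t c
    have hlen := absShift_length j e (e.getD j 0) t c
    rw [scatterR_set_stride _ gap hg _ l start _ (by omega)]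
    have harith : start + j * gap + gap = start + (j + 1) * gap := by ring
    rw [harith]
    rw [absFor_pos e j t c hj2]
    simp only [List.getD_eq_getElem?_getD] at hjle hlen ⊢
    refine ih _ (j + 1) _ _ ?_ ?_ (by omega)
    · simp only [List.length_set, hlen]
      omega
    · simp only [List.length_set, hlen]
      exact hel

-- abstract correctness: insertion of cv into a sorted prefix
theorem insertBy_append_last (s : List Int) (a cv : Int) (h : cv < a) :
    PySem.List.insertBy (fun x y => decide (x < y)) cv (s ++ [a])
      = PySem.List.insertBy (fun x y => decide (x < y)) cv s ++ [a] := by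
  induction s with
  | nil => simp [PySem.List.insertBy, h]
  | cons y s ih =>
    by_cases hy : cv < y
    · simp [PySem.List.insertBy, hy]
    · simp [PySem.List.insertBy, hy, ih]

theorem insAbs (s : List Int) : ∀ (d : List Int) (x cv t c : Int), s.Pairwise (· ≤ ·) →
    ((absShift (s ++ x :: d) s.length cv t c).1.set (absShift (s ++ x :: d) s.length cv t c).2.1 cv,
      (absShift (s ++ x :: d) s.length cv t c).2.2.1,
      (absShift (s ++ x :: d) s.length cv t c).2.2.2)
    = (PySem.List.insertBy (fun a b => decide (a < b)) cv s ++ d,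
       t + (s.countP (fun y => decide (cv < y)) : Int),
       c + (s.countP (fun y => decide (cv < y)) : Int)) := by
  induction s using List.reverseRecOn with
  | nil =>
    intro d x cv t c _
    simp only [List.nil_append, List.length_nil]
    rw [absShift_neg _ _ _ _ _ (by omega)]
    simp [PySem.List.insertBy]
  | append_singleton s' a ih =>
    intro d x cv t c hs
    rw [List.pairwise_append] at hs
    obtain ⟨hs', -, hall⟩ := hs
    have hlen : (s' ++ [a]).length = s'.length + 1 := by simp
    have hmid : ((s' ++ [a]) ++ x :: d).getD ((s' ++ [a]).length - 1) 0 = a := by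
      rw [hlen]
      simp only [Nat.add_sub_cancel]
      have : (s' ++ [a]) ++ x :: d = s' ++ a :: (x :: d) := by simp
      rw [this]
      exact pvGetD_mid s' (x :: d) a
    by_cases hcv : cv < a
    · have hcond : 1 ≤ (s' ++ [a]).length ∧
          ((s' ++ [a]) ++ x :: d).getD ((s' ++ [a]).length - 1) 0 > cv := by
        rw [hmid]; constructor
        · simp
        · exact hcv
      rw [absShift_pos _ _ _ _ _ hcond, hmid]
      rw [pvSet_mid (s' ++ [a]) d x a]
      have hform : (s' ++ [a]) ++ a :: d = s' ++ a :: (a :: d) := by simp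
      have hj : (s' ++ [a]).length - 1 = s'.length := by simp
      rw [hform, hj]
      rw [ih (a :: d) a cv (t + 1) (c + 1) hs']
      rw [insertBy_append_last s' a cv hcv]
      simp only [Prod.mk.injEq]
      refine ⟨by simp, ?_, ?_⟩ <;>
      · simp [List.countP_append, hcv]
        ring
    · have hcond : ¬ (1 ≤ (s' ++ [a]).length ∧
          ((s' ++ [a]) ++ x :: d).getD ((s' ++ [a]).length - 1) 0 > cv) := by
        rw [hmid]
        intro hc
        exact hcv (by exact_mod_cast hc.2)
      rw [absShift_neg _ _ _ _ _ hcond]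
      have hnot : ∀ y ∈ s' ++ [a], (fun a b => decide (a < b)) cv y = false := by
        intro y hy
        simp only [decide_eq_false_iff_not]
        rcases List.mem_append.mp hy with hy' | hy'
        · have := hall y hy' a (List.mem_singleton_self a)
          omega
        · simp at hy'
          omega
      rw [PySem.List.insertBy_of_forall_not_before _ _ _ hnot]
      rw [pvSet_mid (s' ++ [a]) d x cv]
      have hzero : (s' ++ [a]).countP (fun y => decide (cv < y)) = 0 := by
        rw [List.countP_eq_zero]
        intro y hy
        simpa using hnot y hy
      rw [hzero]
      simp

-- the per-index inversion contribution and its partial sums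
def gI (e : List Int) (q : Nat) : Int := ((e.take q).countP (fun y => decide (e.getD q 0 < y)) : Int)
def Isum (e : List Int) (j : Nat) : Int := ((List.range j).map (gI e)).sum

theorem take_eq_map_range (e : List Int) (j : Nat) (h : j ≤ e.length) :
    e.take j = (List.range j).map (fun i => e.getD i 0) := by
  apply List.ext_getElem
  · simp [h]
  · intro i h1 h2
    simp only [List.getElem_take, List.getElem_map, List.getElem_range]
    rw [pvGetD_eq_getElem e i (by simp at h1; omega)]

theorem invCount_eq (e : List Int) : invCount e = Isum e e.length := by
  unfold invCount Isum
  have h1 : ∀ j ∈ List.range e.length, ∀ acc : Int,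
      (List.range j).foldl (fun acc2 i => if e.getD i 0 > e.getD j 0 then acc2 + 1 else acc2) acc
        = acc + gI e j := by
    intro j hj acc
    have hjlen : j ≤ e.length := le_of_lt (List.mem_range.mp hj)
    simp only [gt_iff_lt]
    rw [PySem.List.foldl_ite_add_one (fun i => e.getD j 0 < e.getD i 0)]
    unfold gI
    rw [take_eq_map_range e j hjlen, List.countP_map]
    rfl
  have h2 : (List.range e.length).foldl (fun acc j =>
        (List.range j).foldl (fun acc2 i => if e.getD i 0 > e.getD j 0 then acc2 + 1 else acc2) acc) 0
      = (List.range e.length).foldl (fun acc j => acc + gI e j) 0 := by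
    apply PySem.List.foldl_congr_mem'
    exact h1
  rw [h2, PySem.List.foldl_add]
  simp

theorem sorted_take_succ (e : List Int) (j : Nat) (h : j < e.length) :
    PySem.List.sorted (e.take (j + 1)) (fun x => x)
      = PySem.List.insertBy (fun a b => decide (a < b)) (e.getD j 0)
          (PySem.List.sorted (e.take j) (fun x => x)) := by
  have h2 : e.take (j + 1) = e.take j ++ [e.getD j 0] := by
    rw [pvGetD_eq_getElem e j h, List.take_add_one, List.getElem?_eq_getElem h]
    rfl
  rw [h2, PySem.List.sorted_eq_foldl_insertBy, List.foldl_append,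
    ← PySem.List.sorted_eq_foldl_insertBy]
  rfl

theorem absFor_run (e : List Int) : ∀ (m j : Nat) (t c : Int),
    m = e.length - j → 1 ≤ j → j ≤ e.length →
    absFor (PySem.List.sorted (e.take j) (fun x => x) ++ e.drop j) j t c
      = (PySem.List.sorted e (fun x => x),
         t + (Isum e e.length - Isum e j) + ((e.length - j : Nat) : Int),
         c + (Isum e e.length - Isum e j)) := by
  intro m
  induction m with
  | zero =>
    intro j t c hm h1 h2
    have hj : j = e.length := by omega
    subst hj
    rw [absFor_neg _ _ _ _ (by simp [PySem.List.length_sorted])]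
    simp [List.take_length, List.drop_length]
  | succ m ih =>
    intro j t c hm h1 h2
    have hj2 : j < e.length := by omega
    have hslen : (PySem.List.sorted (e.take j) (fun x => x)).length = j := by
      simp [PySem.List.length_sorted]
      omega
    have hElen : (PySem.List.sorted (e.take j) (fun x => x) ++ e.drop j).length = e.length := by
      simp [PySem.List.length_sorted]
      omega
    rw [absFor_pos _ _ _ _ (by omega)]
    have hdrop : e.drop j = e.getD j 0 :: e.drop (j + 1) := by
      rw [List.drop_eq_getElem_cons hj2, pvGetD_eq_getElem e j hj2]
    have hcv : (PySem.List.sorted (e.take j) (fun x => x) ++ e.drop j).getD j 0 = e.getD j 0 := by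
      rw [hdrop]
      have h3 := pvGetD_mid (PySem.List.sorted (e.take j) (fun x => x)) (e.drop (j + 1)) (e.getD j 0)
      rw [hslen] at h3
      exact h3
    rw [hcv]
    have hpair : (PySem.List.sorted (e.take j) (fun x => x)).Pairwise (· ≤ ·) :=
      PySem.List.sorted_pairwise (e.take j) (fun x => x)
    have hins := insAbs (PySem.List.sorted (e.take j) (fun x => x))
      (e.drop (j + 1)) (e.getD j 0) (e.getD j 0) t c hpair
    rw [hslen] at hins
    rw [hdrop]
    simp only [Prod.mk.injEq] at hins
    obtain ⟨hA, hT, hC⟩ := hins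
    rw [hA, hT, hC]
    rw [← sorted_take_succ e j hj2]
    rw [ih (j + 1) _ _ (by omega) (by omega) (by omega)]
    have hI : Isum e (j + 1) = Isum e j + gI e j := by
      simp [Isum, List.range_succ]
    have hgval : ((PySem.List.sorted (e.take j) (fun x => x)).countP
        (fun y => decide (e.getD j 0 < y)) : Int) = gI e j := by
      unfold gI
      congr 1
      exact (PySem.List.sorted_perm (e.take j) (fun x => x) false).countP_eq _
    simp only [Prod.mk.injEq, true_and]
    refine ⟨?_, ?_⟩ <;> omega

theorem extractSub_length (l : List Int) (start gap : Nat) :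
    (extractSub l start gap).length = subLen l.length start gap := by
  simp [extractSub]

theorem scatter_length (l : List Int) (start gap : Nat) (vals : List Int) :
    (scatter l start gap vals).length = l.length := by
  rw [scatter_eq_scatterR]; exact scatterR_length vals gap l start

-- the per-start lemma: one gapInsertionSort call = B's per-start step
theorem perStart (l : List Int) (start gap : Nat)
    (hg : 1 ≤ gap) (hs : start < gap) (hn : start < l.length) :
    gapInsertionSort l start gap
      = (scatter l start gap (PySem.List.sorted (extractSub l start gap) (fun x => x)),
         invCount (extractSub l start gap) + ((extractSub l start gap).length : Int) - 1,
         invCount (extractSub l start gap)) := by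
  have hlen : (extractSub l start gap).length = subLen l.length start gap :=
    extractSub_length l start gap
  have hk : 1 ≤ (extractSub l start gap).length := by
    rw [hlen]; exact subLen_pos _ _ _ hg hn
  have hl0 : scatterR l start gap (extractSub l start gap) = l := by
    unfold extractSub
    exact scatterR_extract_self gap _ l start
  unfold gapInsertionSort
  calc gapForLoop l l.length (start + gap) gap 0 0
      = gapForLoop (scatterR l start gap (extractSub l start gap)) l.length
          (start + 1 * gap) gap 0 0 := by rw [hl0, Nat.one_mul]
    _ = (scatterR l start gap (absFor (extractSub l start gap) 1 0 0).1,
         (absFor (extractSub l start gap) 1 0 0).2.1,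
         (absFor (extractSub l start gap) 1 0 0).2.2) :=
        sim_for l start gap hg hs ((extractSub l start gap).length - 1)
          (extractSub l start gap) 1 0 0 rfl hlen (le_refl 1)
    _ = (scatter l start gap (PySem.List.sorted (extractSub l start gap) (fun x => x)),
         invCount (extractSub l start gap) + ((extractSub l start gap).length : Int) - 1,
         invCount (extractSub l start gap)) := by
        have h1 : PySem.List.sorted ((extractSub l start gap).take 1) (fun x => x)
            ++ (extractSub l start gap).drop 1 = extractSub l start gap := by
          rcases he : extractSub l start gap with _ | ⟨a, tail⟩
          · rw [he] at hk; simp at hk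
          · simp only [List.take_succ_cons, List.take_zero, List.drop_succ_cons, List.drop_zero]
            rw [PySem.List.sorted_eq_self_of_pairwise _ _ (List.pairwise_singleton _ _)]
            rfl
        have hrun := absFor_run (extractSub l start gap)
          ((extractSub l start gap).length - 1) 1 0 0 rfl (le_refl 1) hk
        rw [h1] at hrun
        rw [hrun]
        dsimp only
        have hI1 : Isum (extractSub l start gap) 1 = 0 := by
          simp [Isum, gI, List.range_succ]
        rw [scatter_eq_scatterR]
        refine (Prod.mk.injEq _ _ _ _).mpr ⟨rfl, (Prod.mk.injEq _ _ _ _).mpr ⟨?_, ?_⟩⟩ <;>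
        · rw [invCount_eq, hI1]
          omega

theorem startLoop_fold_eq (gap : Nat) (hg : 1 ≤ gap) :
    ∀ (starts : List Nat) (st : List Int × Int × Int),
      (∀ s ∈ starts, s < gap) → gap * 2 ≤ st.1.length →
    starts.foldl (fun st start =>
      match gapInsertionSort st.1 start gap with
      | (l', gt, gc) => (l', st.2.1 + gt, st.2.2 + gc)) st
    = starts.foldl (fun st start =>
        let sub := extractSub st.1 start gap
        let inv := invCount sub
        (scatter st.1 start gap (PySem.List.sorted sub (fun x => x)),
         st.2.1 + inv + (sub.length : Int) - 1, st.2.2 + inv)) st := by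
  intro starts
  induction starts with
  | nil => intro st _ _; rfl
  | cons s ss ih =>
    intro st hmem hn
    simp only [List.foldl_cons]
    have hsg : s < gap := hmem s (by simp)
    have hsn : s < st.1.length := by omega
    have hA := perStart st.1 s gap hg hsg hsn
    have hstep :
        (((gapInsertionSort st.1 s gap).1, st.2.1 + (gapInsertionSort st.1 s gap).2.1,
          st.2.2 + (gapInsertionSort st.1 s gap).2.2) : List Int × Int × Int)
        = ((scatter st.1 s gap (PySem.List.sorted (extractSub st.1 s gap) (fun x => x)),
            st.2.1 + invCount (extractSub st.1 s gap) + ((extractSub st.1 s gap).length : Int) - 1,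
            st.2.2 + invCount (extractSub st.1 s gap)) : List Int × Int × Int) := by
      rw [hA]
      dsimp only
      refine (Prod.mk.injEq _ _ _ _).mpr ⟨rfl, (Prod.mk.injEq _ _ _ _).mpr ⟨by ring, rfl⟩⟩
    rw [hstep]
    apply ih
    · intro x hx; exact hmem x (by simp [hx])
    · simp only [scatter_length]
      exact hn

theorem altStartLoop_length (gap : Nat) (st : List Int × Int × Int) :
    (altStartLoop gap st).1.length = st.1.length := by
  unfold altStartLoop
  generalize List.range gap = starts
  induction starts generalizing st with
  | nil => rfl
  | cons s ss ih =>
    simp only [List.foldl_cons]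
    rw [ih]
    simp [scatter_length]

theorem gapLoop_eq (sc : Nat) : ∀ (l : List Int) (t c : Int), sc * 2 ≤ l.length →
    shesGapLoop l sc t c = altGapLoop l sc t c := by
  induction sc using Nat.strong_induction_on with
  | _ sc ih =>
    intro l t c h
    rcases Nat.eq_zero_or_pos sc with h0 | hpos
    · subst h0
      rw [shesGapLoop, altGapLoop]
      simp
    · rw [shesGapLoop, dif_pos hpos, altGapLoop, dif_pos hpos]
      have hstart : shesStartLoop sc (l, t, c + 1) = altStartLoop sc (l, t, c + 1) := by
        unfold shesStartLoop altStartLoop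
        exact startLoop_fold_eq sc (by omega) (List.range sc) (l, t, c + 1)
          (fun s hs => List.mem_range.mp hs) (by simpa using h)
      rw [hstart]
      rcases hr : altStartLoop sc (l, t, c + 1) with ⟨l', t', c'⟩
      have hlen : l'.length = l.length := by
        have h2 := altStartLoop_length sc (l, t, c + 1)
        rw [hr] at h2
        simpa using h2
      have hdiv : sc / 2 * 2 ≤ sc := by
        have := Nat.div_mul_le_self sc 2
        omega
      exact ih (sc / 2) (Nat.div_lt_self hpos (by omega)) l' t' c' (by omega)

-- ===== VERDICT (by name: the statement is the Claim_ definition above) =====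
theorem SheS_spec : Claim_equal_SheS := by
  intro lista _
  unfold Spec_SheS SheS SheS_alt
  rw [gapLoop_eq (lista.length / 2) lista 0 0 (Nat.div_mul_le_self lista.length 2)]
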